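-- pv_equiv track=rewrite | github.com/aurorazl/math | Topology/子集问题.py | repeatableStringSubSet
-- ===== SOURCE A (Python) =====
-- def repeatableStringSubSet(s):
--     res = []
--     n = len(s)
--
--     def search(i, tmp):
--         if tmp not in res:
--             res.append(tmp)
--         for j in range(i, n):
--             search(j + 1, tmp + s[j])
--
--     search(0, "")
--     return res
-- ===== SOURCE B (Python) =====
-- def repeatableStringSubSet(s):
--     # Generate the full pre-order list of subsequences by a single linear
--     # recursion (gen(rest) = [""] + rest[0]-prefixed copies + the rest's tail),
--     # then dedup keeping first occurrences.
--     def gen(rest):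
--         if not rest:
--             return [""]
--         g = gen(rest[1:])
--         return [""] + [rest[0] + t for t in g] + g[1:]
--
--     res = []
--     for t in gen(s):
--         if t not in res:
--             res.append(t)
--     return res
-- ===== Notes on version B (the rewrite author's own statement) =====
-- stated objective: alternative
-- what changed: A interleaves dedup with a branching DFS over start indices carrying an accumulator; B first builds the whole pre-order subsequence list by a single linear recursion (gen(rest) = [""] + prefixed copies of gen(rest[1:]) + its tail) and then dedups in one pass keeping first occurrences.
import Mathlib
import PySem

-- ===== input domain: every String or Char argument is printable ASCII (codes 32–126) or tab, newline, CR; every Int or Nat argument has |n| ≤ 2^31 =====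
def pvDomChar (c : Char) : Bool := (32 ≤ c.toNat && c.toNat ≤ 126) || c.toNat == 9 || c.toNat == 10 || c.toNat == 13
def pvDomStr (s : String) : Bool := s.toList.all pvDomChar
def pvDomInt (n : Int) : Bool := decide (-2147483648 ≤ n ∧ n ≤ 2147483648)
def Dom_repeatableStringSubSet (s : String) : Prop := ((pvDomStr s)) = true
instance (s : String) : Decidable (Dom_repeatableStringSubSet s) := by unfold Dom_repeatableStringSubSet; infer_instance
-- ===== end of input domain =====

-- B replaces A's accumulator-carrying DFS by pure generation of the pre-order
-- subsequence list via a single linear recursion, followed by a separate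
-- first-occurrence dedup pass (objective: alternative decomposition, same cost).

-- ===== PORT A =====
-- search(i, tmp) only reads s[i:], so the index i is ported as structural
-- recursion on the remaining character list (exact for forward in-range access).
mutual
  -- body of `search`: dedup-append tmp, then run the for-loop over j
  def pvSearchA (rest : List Char) (tmp : String) (res : List String) : List String :=
    pvForA rest tmp (if tmp ∈ res then res else res ++ [tmp])
  termination_by (rest.length, 1)
  -- `for j in range(i, n): search(j+1, tmp + s[j])`
  def pvForA (rest : List Char) (tmp : String) (res : List String) : List String :=
    match rest with
    | [] => res
    | c :: rs => pvForA rs tmp (pvSearchA rs (tmp.push c) res)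
  termination_by (rest.length, 0)
end

def repeatableStringSubSet (s : String) : List String :=
  pvSearchA s.toList "" []

-- ===== PORT B =====
-- gen(rest): pre-order list of all subsequences of rest ("" first);
-- the string slice rest[1:] / index rest[0] is the structural head/tail.
def pvGenB : List Char → List String
  | [] => [""]
  | c :: rs =>
      let g := pvGenB rs
      "" :: (g.map (fun t => String.singleton c ++ t) ++ g.tail)

def repeatableStringSubSet_alt (s : String) : List String :=
  (pvGenB s.toList).foldl (fun res t => if t ∈ res then res else res ++ [t]) []

-- ===== PRECONDITION & SPEC =====
def Spec_repeatableStringSubSet (s : String) (out : List String) : Prop := out = repeatableStringSubSet_alt s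
instance (s : String) (out : List String) : Decidable (Spec_repeatableStringSubSet s out) := by unfold Spec_repeatableStringSubSet; infer_instance

-- ===== CLAIM (what is proved, stated in full; the proofs are below) =====
def Claim_equal_repeatableStringSubSet : Prop := ∀ (s : String), Dom_repeatableStringSubSet s → Spec_repeatableStringSubSet s (repeatableStringSubSet s)

-- ===== LEMMAS AND PROOFS =====

-- the list of tmp-values visited by A's for-loop, in order
def pvVisit : List Char → String → List String
  | [], _ => []
  | c :: rs, tmp => (tmp.push c :: pvVisit rs (tmp.push c)) ++ pvVisit rs tmp

def pvStep (res : List String) (t : String) : List String :=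
  if t ∈ res then res else res ++ [t]

theorem pvPush_append (tmp : String) (c : Char) (t : String) :
    (tmp.push c) ++ t = tmp ++ (String.singleton c ++ t) := by
  apply String.ext; simp

theorem pvGenB_head : ∀ (rest : List Char), ∃ l, pvGenB rest = "" :: l := by
  intro rest
  cases rest with
  | nil => exact ⟨[], rfl⟩
  | cons c rs => exact ⟨_, rfl⟩

-- A's visit list is the tail of B's generated list, shifted by the prefix tmp
theorem pvVisit_eq_gen (rest : List Char) :
    ∀ (tmp : String), pvVisit rest tmp = ((pvGenB rest).tail).map (fun t => tmp ++ t) := by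
  induction rest with
  | nil => intro tmp; simp [pvVisit, pvGenB]
  | cons c rs ih =>
      intro tmp
      obtain ⟨l, hl⟩ := pvGenB_head rs
      simp only [pvVisit, pvGenB, ih, List.tail_cons, List.map_append, List.map_map]
      rw [hl]
      simp only [List.map_cons, List.tail_cons, Function.comp_def, ← pvPush_append,
        String.append_empty]

theorem pvForA_foldl (rest : List Char) :
    ∀ (tmp : String) (res : List String),
      pvForA rest tmp res = (pvVisit rest tmp).foldl pvStep res := by
  induction rest with
  | nil => intro tmp res; simp [pvForA, pvVisit]
  | cons c rs ih =>
      intro tmp res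
      rw [pvForA, pvSearchA, ih, ih, pvVisit, List.foldl_append]
      rfl

theorem pvSearchA_foldl (rest : List Char) (tmp : String) (res : List String) :
    pvSearchA rest tmp res = (tmp :: pvVisit rest tmp).foldl pvStep res := by
  rw [pvSearchA, pvForA_foldl]; rfl

-- ===== VERDICT (by name: the statement is the Claim_ definition above) =====
theorem repeatableStringSubSet_spec : Claim_equal_repeatableStringSubSet := by
  intro s _
  unfold Spec_repeatableStringSubSet repeatableStringSubSet repeatableStringSubSet_alt
  rw [pvSearchA_foldl, pvVisit_eq_gen]
  obtain ⟨l, hl⟩ := pvGenB_head s.toList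
  rw [hl]
  simp only [List.tail_cons]
  have : (fun t => ("" : String) ++ t) = id := by
    funext t; exact String.empty_append
  rw [this, List.map_id]
  rfl
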